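-- pv_equiv track=rewrite | github.com/AlexeySorokin/LORuGEC | retriever/utils.py | score_operations
-- ===== SOURCE A (Python) =====
-- from collections import defaultdict
--
-- def score_operations(corr_operations, pred_operations):
--     i, j = 0, 0
--     counts = defaultdict(int)
--     while i < len(corr_operations) and j < len(pred_operations):
--         left_span, right_span = tuple(corr_operations[i][:2]), tuple(pred_operations[j][:2])
--         if left_span == right_span:
--             if corr_operations[i][2] == pred_operations[j][2]:
--                 counts["TP"] += 1
--             else:
--                 counts["FP"] += 1
--                 counts["FN"] += 1
--             i, j = i+1, j+1
--         elif left_span < right_span: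
--             counts["FN"] += 1
--             i += 1
--         else:
--             counts["FP"] += 1
--             j += 1
--     counts["FN"] += len(corr_operations)-i
--     counts["FP"] += len(pred_operations)-j
--     return counts
-- ===== SOURCE B (Python) =====
-- from collections import defaultdict
--
-- def score_operations(corr_operations, pred_operations):
--     # Two stacks (reversed copies), consumed by the minimum current span:
--     # each step pops every stack whose top sits at that span and classifies
--     # the step from the pair of popped operations (None = that side has no
--     # operation at this span).
--     counts = defaultdict(int)
--     corr = corr_operations[::-1]
--     pred = pred_operations[::-1]
--     while corr and pred:
--         cs, ps = (corr[-1][0], corr[-1][1]), (pred[-1][0], pred[-1][1])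
--         m = min(cs, ps)
--         a = corr.pop()[2] if cs == m else None
--         b = pred.pop()[2] if ps == m else None
--         if a == b:
--             counts["TP"] += 1
--         else:
--             if b is not None:
--                 counts["FP"] += 1
--             if a is not None:
--                 counts["FN"] += 1
--     counts["FN"] += len(corr)
--     counts["FP"] += len(pred)
--     return counts
-- ===== Notes on version B (the rewrite author's own statement) =====
-- stated objective: alternative
-- what changed: B replaces A's index-driven three-way comparison chain with two reversed stacks consumed by the minimum current span: each step pops every stack whose top sits at that span and classifies the step from the Optional pair of popped operations with guarded increments, instead of if/elif/else branches over i/j index arithmetic.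
import Mathlib
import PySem

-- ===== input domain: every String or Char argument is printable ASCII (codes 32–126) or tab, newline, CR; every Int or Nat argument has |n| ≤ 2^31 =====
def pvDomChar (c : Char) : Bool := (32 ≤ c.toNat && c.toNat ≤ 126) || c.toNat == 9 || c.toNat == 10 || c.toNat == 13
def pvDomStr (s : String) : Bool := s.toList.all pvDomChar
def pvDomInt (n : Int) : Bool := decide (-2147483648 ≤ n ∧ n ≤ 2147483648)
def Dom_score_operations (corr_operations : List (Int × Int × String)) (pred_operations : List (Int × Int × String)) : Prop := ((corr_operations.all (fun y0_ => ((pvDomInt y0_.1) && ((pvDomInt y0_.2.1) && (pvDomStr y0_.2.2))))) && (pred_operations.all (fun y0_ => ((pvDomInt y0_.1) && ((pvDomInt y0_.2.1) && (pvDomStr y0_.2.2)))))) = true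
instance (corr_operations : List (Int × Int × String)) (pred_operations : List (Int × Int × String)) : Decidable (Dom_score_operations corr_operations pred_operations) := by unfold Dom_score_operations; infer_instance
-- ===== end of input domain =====

-- B replaces A's index-driven three-way comparison chain with two reversed stacks consumed by the minimum current span, classifying each step from the Optional pair of popped operations (alternative decomposition; same cost, not claimed faster).


-- Python `<` on 2-tuples of ints (lexicographic); used by port A for `left_span < right_span`.
def spanLt (a b : Int × Int) : Bool := a.1 < b.1 || (a.1 == b.1 && a.2 < b.2)

-- Python `<=` on 2-tuples of ints (lexicographic); used by port B's `min` of two spans.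
def spanLe (a b : Int × Int) : Bool := a.1 < b.1 || (a.1 == b.1 && a.2 ≤ b.2)

-- ===== PORT A =====
-- the while loop: state (i, j, counts); counts[k] += 1 is Dict.modify k 0 (· + 1) (defaultdict(int));
-- fuel is a totality guard only (each iteration consumes one unit; the caller passes enough for the whole loop)
def scoreLoopA (fuel : Nat) (corr_operations : List (Int × Int × String)) (pred_operations : List (Int × Int × String)) (i j : Nat) (counts : PySem.Dict String Int) : Nat × Nat × PySem.Dict String Int :=
  match fuel with
  | 0 => (i, j, counts)
  | fuel + 1 =>
    if h : i < corr_operations.length ∧ j < pred_operations.length then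
      if (corr_operations[i].1, corr_operations[i].2.1) = (pred_operations[j].1, pred_operations[j].2.1) then
        if corr_operations[i].2.2 = pred_operations[j].2.2 then
          scoreLoopA fuel corr_operations pred_operations (i+1) (j+1) (counts.modify "TP" 0 (· + 1))
        else
          scoreLoopA fuel corr_operations pred_operations (i+1) (j+1) ((counts.modify "FP" 0 (· + 1)).modify "FN" 0 (· + 1))
      else if spanLt (corr_operations[i].1, corr_operations[i].2.1) (pred_operations[j].1, pred_operations[j].2.1) then
        scoreLoopA fuel corr_operations pred_operations (i+1) j (counts.modify "FN" 0 (· + 1))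
      else
        scoreLoopA fuel corr_operations pred_operations i (j+1) (counts.modify "FP" 0 (· + 1))
    else
      (i, j, counts)

def score_operations (corr_operations : List (Int × Int × String)) (pred_operations : List (Int × Int × String)) : List (String × Int) :=
  let r := scoreLoopA (corr_operations.length + pred_operations.length) corr_operations pred_operations 0 0 PySem.Dict.empty
  let counts := r.2.2.modify "FN" 0 (· + ((corr_operations.length : Int) - (r.1 : Int)))
  let counts := counts.modify "FP" 0 (· + ((pred_operations.length : Int) - (r.2.1 : Int)))
  counts.items

-- ===== PORT B =====
-- the while loop of Source B: the two reversed stacks (pop from the end) and counts; `while corr and pred`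
-- is "both getLast? return a value"; `min(cs, ps)` on int pairs is `if spanLe cs ps then cs else ps` (exact:
-- Python's min returns its first argument on ties, and the arguments are compared lexicographically).
def scoreLoopB (fuel : Nat) (corr pred : List (Int × Int × String)) (counts : PySem.Dict String Int) :
    List (Int × Int × String) × List (Int × Int × String) × PySem.Dict String Int :=
  match fuel with
  | 0 => (corr, pred, counts)
  | fuel + 1 =>
    if h : corr ≠ [] ∧ pred ≠ [] then
      let ct := corr.getLast h.1                                       -- corr[-1]
      let pt := pred.getLast h.2                                       -- pred[-1]
      let cs := (ct.1, ct.2.1)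
      let ps := (pt.1, pt.2.1)
      let m := if spanLe cs ps then cs else ps                         -- min(cs, ps)
      let a := if cs = m then some ct.2.2 else none                    -- corr.pop()[2] if cs == m else None
      let corr' := if cs = m then corr.dropLast else corr
      let b := if ps = m then some pt.2.2 else none                    -- pred.pop()[2] if ps == m else None
      let pred' := if ps = m then pred.dropLast else pred
      let counts' :=
        if a = b then counts.modify "TP" 0 (· + 1)
        else
          let c1 := if b.isSome then counts.modify "FP" 0 (· + 1) else counts
          if a.isSome then c1.modify "FN" 0 (· + 1) else c1
      scoreLoopB fuel corr' pred' counts'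
    else (corr, pred, counts)

def score_operations_alt (corr_operations : List (Int × Int × String)) (pred_operations : List (Int × Int × String)) : List (String × Int) :=
  -- corr_operations[::-1] / pred_operations[::-1]: a reversed copy (exact: List.reverse)
  let r := scoreLoopB (corr_operations.length + pred_operations.length) corr_operations.reverse pred_operations.reverse PySem.Dict.empty
  let counts := r.2.2.modify "FN" 0 (· + (r.1.length : Int))           -- counts["FN"] += len(corr)
  let counts := counts.modify "FP" 0 (· + (r.2.1.length : Int))        -- counts["FP"] += len(pred)
  counts.items

-- ===== PRECONDITION & SPEC =====
def Spec_score_operations (corr_operations : List (Int × Int × String)) (pred_operations : List (Int × Int × String)) (out : List (String × Int)) : Prop := out = score_operations_alt corr_operations pred_operations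
instance (corr_operations : List (Int × Int × String)) (pred_operations : List (Int × Int × String)) (out : List (String × Int)) : Decidable (Spec_score_operations corr_operations pred_operations out) := by unfold Spec_score_operations; infer_instance

-- ===== CLAIM (what is proved, stated in full; the proofs are below) =====
def Claim_equal_score_operations : Prop := ∀ (corr_operations : List (Int × Int × String)) (pred_operations : List (Int × Int × String)), Dom_score_operations corr_operations pred_operations → Spec_score_operations corr_operations pred_operations (score_operations corr_operations pred_operations)

-- ===== LEMMAS AND PROOFS =====

-- the common reference walk both loops compute: structural recursion on the two lists,
-- returning the two leftover lists and the counts dict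
def pvWalk : List (Int × Int × String) → List (Int × Int × String) → PySem.Dict String Int →
    List (Int × Int × String) × List (Int × Int × String) × PySem.Dict String Int
  | c :: cs, p :: ps, counts =>
    if (c.1, c.2.1) = (p.1, p.2.1) then
      pvWalk cs ps (if c.2.2 = p.2.2 then counts.modify "TP" 0 (· + 1)
                    else (counts.modify "FP" 0 (· + 1)).modify "FN" 0 (· + 1))
    else if spanLt (c.1, c.2.1) (p.1, p.2.1) then
      pvWalk cs (p :: ps) (counts.modify "FN" 0 (· + 1))
    else
      pvWalk (c :: cs) ps (counts.modify "FP" 0 (· + 1))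
  | c, p, counts => (c, p, counts)

theorem pvWalk_len_le (n : Nat) : ∀ (c p : List (Int × Int × String)) (d : PySem.Dict String Int),
    c.length + p.length ≤ n →
    (pvWalk c p d).1.length ≤ c.length ∧ (pvWalk c p d).2.1.length ≤ p.length := by
  induction n with
  | zero =>
    intro c p d hn
    match c, p with
    | [], p => simp [pvWalk]
    | c :: cs, [] => simp [pvWalk]
  | succ n ih =>
    intro c p d hn
    match c, p with
    | [], p => simp [pvWalk]
    | c :: cs, [] => simp [pvWalk]
    | c :: cs, p :: ps =>
      rw [pvWalk]
      simp only [List.length_cons] at hn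
      by_cases hq : ((c.1, c.2.1) : Int × Int) = (p.1, p.2.1)
      · rw [if_pos hq]
        have := ih cs ps (if c.2.2 = p.2.2 then d.modify "TP" 0 (· + 1)
            else (d.modify "FP" 0 (· + 1)).modify "FN" 0 (· + 1)) (by omega)
        simp only [List.length_cons]
        omega
      · rw [if_neg hq]
        by_cases h3 : spanLt (c.1, c.2.1) (p.1, p.2.1) = true
        · rw [if_pos h3]
          have := ih cs (p :: ps) (d.modify "FN" 0 (· + 1)) (by simp; omega)
          simp only [List.length_cons] at this ⊢
          omega
        · rw [if_neg h3]
          have := ih (c :: cs) ps (d.modify "FP" 0 (· + 1)) (by simp; omega)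
          simp only [List.length_cons] at this ⊢
          omega

theorem scoreLoopA_eq (n : Nat) (corr pred : List (Int × Int × String)) :
    ∀ i j (counts : PySem.Dict String Int),
      (corr.length - i) + (pred.length - j) ≤ n → i ≤ corr.length → j ≤ pred.length →
      scoreLoopA n corr pred i j counts =
        (corr.length - (pvWalk (corr.drop i) (pred.drop j) counts).1.length,
         pred.length - (pvWalk (corr.drop i) (pred.drop j) counts).2.1.length,
         (pvWalk (corr.drop i) (pred.drop j) counts).2.2) := by
  induction n with
  | zero =>
    intro i j counts hn hi hj
    rw [scoreLoopA]
    rw [List.drop_eq_nil_of_le (show corr.length ≤ i by omega),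
        List.drop_eq_nil_of_le (show pred.length ≤ j by omega)]
    simp [pvWalk]
    omega
  | succ n ih =>
    intro i j counts hn hi hj
    rw [scoreLoopA]
    by_cases h : i < corr.length ∧ j < pred.length
    · rw [dif_pos h]
      have hdc : corr.drop i = corr[i] :: corr.drop (i+1) := List.drop_eq_getElem_cons h.1
      have hdp : pred.drop j = pred[j] :: pred.drop (j+1) := List.drop_eq_getElem_cons h.2
      rw [hdc, hdp, pvWalk]
      by_cases h1 : (corr[i].1, corr[i].2.1) = (pred[j].1, pred[j].2.1)
      · rw [if_pos h1, if_pos h1]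
        by_cases h2 : corr[i].2.2 = pred[j].2.2
        · rw [if_pos h2, if_pos h2, ih (i+1) (j+1) _ (by omega) (by omega) (by omega)]
        · rw [if_neg h2, if_neg h2, ih (i+1) (j+1) _ (by omega) (by omega) (by omega)]
      · rw [if_neg h1, if_neg h1]
        by_cases h3 : spanLt (corr[i].1, corr[i].2.1) (pred[j].1, pred[j].2.1) = true
        · rw [if_pos h3, if_pos h3, ih (i+1) j _ (by omega) (by omega) (by omega), hdp]
        · rw [if_neg h3, if_neg h3, ih i (j+1) _ (by omega) (by omega) (by omega), hdc]
    · rw [dif_neg h]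
      rcases Nat.lt_or_ge i corr.length with hic | hic
      · have hjp : j = pred.length := by omega
        rw [List.drop_eq_nil_of_le (show pred.length ≤ j by omega),
            List.drop_eq_getElem_cons hic]
        simp [pvWalk]
        omega
      · rw [List.drop_eq_nil_of_le (show corr.length ≤ i by omega)]
        simp [pvWalk]
        omega

theorem scoreLoopB_eq (n : Nat) : ∀ (c p : List (Int × Int × String)) (counts : PySem.Dict String Int),
    c.length + p.length ≤ n →
    scoreLoopB n c.reverse p.reverse counts =
      ((pvWalk c p counts).1.reverse, (pvWalk c p counts).2.1.reverse, (pvWalk c p counts).2.2) := by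
  induction n with
  | zero =>
    intro c p counts hn
    have hc : c = [] := by cases c <;> simp_all
    have hp : p = [] := by cases p <;> simp_all
    subst hc; subst hp
    simp [scoreLoopB, pvWalk]
  | succ n ih =>
    intro c p counts hn
    match c, p with
    | [], p => rw [scoreLoopB, dif_neg (by simp)]; simp [pvWalk]
    | c :: cs, [] => rw [scoreLoopB, dif_neg (by simp)]; simp [pvWalk]
    | c0 :: cs, p0 :: ps =>
      simp only [List.length_cons] at hn
      rw [List.reverse_cons, List.reverse_cons,
          scoreLoopB, dif_pos ⟨by simp, by simp⟩]
      simp only [List.getLast_concat, List.dropLast_concat]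
      rw [pvWalk]
      by_cases hq : ((c0.1, c0.2.1) : Int × Int) = (p0.1, p0.2.1)
      · have h12 := Prod.mk.inj hq
        have hle : spanLe (c0.1, c0.2.1) (p0.1, p0.2.1) = true := by
          simp [spanLe]; omega
        rw [if_pos hq]
        simp only [hle, if_true, if_pos hq.symm]
        by_cases hop : c0.2.2 = p0.2.2
        · simp only [hop]
          exact ih cs ps _ (by omega)
        · rw [if_neg (by simp [hop]), if_neg hop]
          simp only [Option.isSome_some, if_true]
          exact ih cs ps _ (by omega)
      · rw [if_neg hq]
        have hq' : ¬(c0.1 = p0.1 ∧ c0.2.1 = p0.2.1) := by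
          intro hh; exact hq (Prod.ext hh.1 hh.2)
        by_cases h3 : spanLt (c0.1, c0.2.1) (p0.1, p0.2.1) = true
        · rw [if_pos h3]
          have hlt : c0.1 < p0.1 ∨ (c0.1 = p0.1 ∧ c0.2.1 < p0.2.1) := by
            simpa [spanLt] using h3
          have hle : spanLe (c0.1, c0.2.1) (p0.1, p0.2.1) = true := by
            simp [spanLe]; omega
          have hne : ((p0.1, p0.2.1) : Int × Int) ≠ (c0.1, c0.2.1) := fun hh => hq hh.symm
          simp only [hle, if_true, if_neg hne]
          simp only [reduceCtorEq, if_false, Option.isSome_none, Option.isSome_some, if_true,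
            Bool.false_eq_true]
          rw [← List.reverse_cons]
          exact ih cs (p0 :: ps) _ (by simp; omega)
        · rw [if_neg h3]
          have hgt : p0.1 < c0.1 ∨ (p0.1 = c0.1 ∧ p0.2.1 < c0.2.1) := by
            have := hq'
            simp [spanLt] at h3
            omega
          have hle : spanLe (c0.1, c0.2.1) (p0.1, p0.2.1) = false := by
            simp [spanLe]; omega
          have hne : ((c0.1, c0.2.1) : Int × Int) ≠ (p0.1, p0.2.1) := hq
          simp only [hle, Bool.false_eq_true, if_false, if_neg hne]
          simp only [reduceCtorEq, if_false, Option.isSome_none, Option.isSome_some, if_true,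
            Bool.false_eq_true]
          rw [← List.reverse_cons]
          exact ih (c0 :: cs) ps _ (by simp; omega)

-- ===== VERDICT (by name: the statement is the Claim_ definition above) =====
theorem score_operations_spec : Claim_equal_score_operations := by
  intro corr pred _
  unfold Spec_score_operations score_operations score_operations_alt
  have hle := pvWalk_len_le (corr.length + pred.length) corr pred PySem.Dict.empty (le_refl _)
  rw [scoreLoopA_eq (corr.length + pred.length) corr pred 0 0 _ (by omega) (by omega) (by omega)]
  rw [scoreLoopB_eq (corr.length + pred.length) corr pred PySem.Dict.empty (le_refl _)]
  simp only [List.drop_zero, List.length_reverse]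
  have e1 : ((corr.length : Int) - ((corr.length - (pvWalk corr pred PySem.Dict.empty).1.length : Nat) : Int))
      = ((pvWalk corr pred PySem.Dict.empty).1.length : Int) := by omega
  have e2 : ((pred.length : Int) - ((pred.length - (pvWalk corr pred PySem.Dict.empty).2.1.length : Nat) : Int))
      = ((pvWalk corr pred PySem.Dict.empty).2.1.length : Int) := by omega
  rw [e1, e2]
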